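-- pv_equiv track=rewrite | github.com/DonnyGulley/Traffic-Insight | Data/TwitterXAPI/TrafficInsight_Twitter.py | clean_tweet_text
-- ===== SOURCE A (Python) =====
-- def clean_tweet_text(tweet_text):
--     """
--     Clean tweet text by removing unwanted characters, links, and mentions.
--     """
--
--     # Remove URLs (http://, https://, www links)
--     words = tweet_text.split()  # Split tweet into words
--     cleaned_words = []
--     for word in words:
--         if word.startswith("http://") or word.startswith("https://") or word.startswith("www."):
--             continue  # Skip this word as it's a URL
--         cleaned_words.append(word)
--
--     tweet_text = " ".join(cleaned_words)  # Rebuild tweet text from cleaned words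
--
--     # Remove Twitter mentions (@username)
--     words = tweet_text.split()
--     cleaned_words = []
--     for word in words:
--         if word.startswith('@'):
--             continue  # Skip mentions starting with "@"
--         cleaned_words.append(word)
--
--     tweet_text = " ".join(cleaned_words)  # Rebuild tweet text from cleaned words
--
--     # Remove hashtags (#hashtag)
--     words = tweet_text.split()
--     cleaned_words = []
--     for word in words:
--         if word.startswith('#'):
--             continue  # Skip hashtags starting with "#"
--         cleaned_words.append(word)
--
--     tweet_text = " ".join(cleaned_words)  # Rebuild tweet text from cleaned words
--
--     # Remove non-alphanumeric characters except spaces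
--     cleaned_words = []
--     for word in tweet_text.split():
--         cleaned_word = ''.join(char for char in word if char.isalnum() or char == ' ')  # Keep alphanumeric and space only
--         cleaned_words.append(cleaned_word)
--
--     tweet_text = " ".join(cleaned_words)  # Rebuild tweet text from cleaned words
--
--     # Remove extra spaces (to make sure there's no leading/trailing space)
--     tweet_text = ' '.join(tweet_text.split())
--
--     # Convert text to lowercase (optional)
--     tweet_text = tweet_text.lower()
--
--     return tweet_text
-- ===== SOURCE B (Python) =====
-- def clean_tweet_text(tweet_text):
--     """
--     Clean tweet text by removing unwanted characters, links, and mentions.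
--     Single fused pass over the words instead of four split/join passes.
--     """
--     kept_words = []
--     for word in tweet_text.split():
--         if (word.startswith("http://") or word.startswith("https://")
--                 or word.startswith("www.") or word.startswith('@')
--                 or word.startswith('#')):
--             continue
--         kept_words.append(''.join(c for c in word if c.isalnum() or c == ' '))
--     tweet_text = ' '.join(kept_words)
--     tweet_text = ' '.join(tweet_text.split())  # drop words emptied by cleaning
--     return tweet_text.lower()
-- ===== Notes on version B (the rewrite author's own statement) =====
-- stated objective: simpler
-- what changed: A's four sequential split/filter/join passes (URLs, mentions, hashtags, char cleaning) are fused into a single loop over the words of one split, followed by the same space-collapsing join and lower().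
import Mathlib
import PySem

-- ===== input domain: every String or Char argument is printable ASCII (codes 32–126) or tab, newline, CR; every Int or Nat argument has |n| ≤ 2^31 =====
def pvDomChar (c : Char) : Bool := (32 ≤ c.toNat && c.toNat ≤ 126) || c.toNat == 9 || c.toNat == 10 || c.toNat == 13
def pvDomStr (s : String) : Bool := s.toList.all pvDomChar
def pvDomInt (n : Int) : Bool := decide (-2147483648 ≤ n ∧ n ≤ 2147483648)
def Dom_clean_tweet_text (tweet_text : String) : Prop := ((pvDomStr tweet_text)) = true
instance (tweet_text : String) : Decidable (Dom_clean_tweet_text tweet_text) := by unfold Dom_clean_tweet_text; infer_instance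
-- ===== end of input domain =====

-- B fuses A's four sequential split/filter/join passes into one loop over the words (objective: simpler).

-- ===== PORT A =====
-- literal port of A: four split → filter → join passes, then a space-collapsing pass, then lower
def clean_tweet_text (tweet_text : String) : String :=
  -- pass 1: drop URLs
  let words := PySem.Chars.split₀ tweet_text.toList
  let cleaned_words := words.foldl (fun acc w =>
    if PySem.Chars.startswith w "http://".toList || PySem.Chars.startswith w "https://".toList
        || PySem.Chars.startswith w "www.".toList then acc else acc ++ [w]) []
  let t1 := PySem.Chars.join [' '] cleaned_words
  -- pass 2: drop @mentions
  let words2 := PySem.Chars.split₀ t1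
  let cleaned2 := words2.foldl (fun acc w =>
    if PySem.Chars.startswith w "@".toList then acc else acc ++ [w]) []
  let t2 := PySem.Chars.join [' '] cleaned2
  -- pass 3: drop #hashtags
  let words3 := PySem.Chars.split₀ t2
  let cleaned3 := words3.foldl (fun acc w =>
    if PySem.Chars.startswith w "#".toList then acc else acc ++ [w]) []
  let t3 := PySem.Chars.join [' '] cleaned3
  -- pass 4: keep only alphanumeric chars (or ' ') inside each word; ''.join of kept chars
  let cleaned4 := (PySem.Chars.split₀ t3).foldl (fun acc w =>
    acc ++ [w.filter (fun c => PySem.Chars.isalnum c || c == ' ')]) []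
  let t4 := PySem.Chars.join [' '] cleaned4
  -- collapse extra spaces, then lowercase
  let t5 := PySem.Chars.join [' '] (PySem.Chars.split₀ t4)
  String.ofList (PySem.Chars.lower t5)

-- ===== PORT B =====
-- port of B: one loop over the words, skipping URLs/@/# and char-cleaning kept words
def clean_tweet_text_alt (tweet_text : String) : String :=
  let kept := (PySem.Chars.split₀ tweet_text.toList).foldl (fun acc w =>
    if PySem.Chars.startswith w "http://".toList || PySem.Chars.startswith w "https://".toList
        || PySem.Chars.startswith w "www.".toList || PySem.Chars.startswith w "@".toList
        || PySem.Chars.startswith w "#".toList then acc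
    else acc ++ [w.filter (fun c => PySem.Chars.isalnum c || c == ' ')]) []
  let t := PySem.Chars.join [' '] kept
  -- drop words emptied by cleaning and collapse spaces, then lowercase
  let t2 := PySem.Chars.join [' '] (PySem.Chars.split₀ t)
  String.ofList (PySem.Chars.lower t2)

-- ===== PRECONDITION & SPEC =====
def Spec_clean_tweet_text (tweet_text : String) (out : String) : Prop := out = clean_tweet_text_alt tweet_text
instance (tweet_text : String) (out : String) : Decidable (Spec_clean_tweet_text tweet_text out) := by unfold Spec_clean_tweet_text; infer_instance

-- ===== CLAIM (what is proved, stated in full; the proofs are below) =====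
def Claim_equal_clean_tweet_text : Prop := ∀ (tweet_text : String), Dom_clean_tweet_text tweet_text → Spec_clean_tweet_text tweet_text (clean_tweet_text tweet_text)

-- ===== LEMMAS AND PROOFS =====

-- a skip-style foldl ('continue' loop) is filter-then-map
theorem foldl_skip_if {α β : Type} (p : α → Bool) (f : α → β) (l : List α) (acc : List β) :
    l.foldl (fun acc x => if p x then acc else acc ++ [f x]) acc
      = acc ++ (l.filter (fun x => !p x)).map f := by
  induction l generalizing acc with
  | nil => simp
  | cons x l ih => by_cases h : p x <;> simp [h, ih]

-- the same, for the 'continue' loops that keep the word unchanged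
theorem foldl_skip_if_id {α : Type} (p : α → Bool) (l : List α) (acc : List α) :
    l.foldl (fun acc x => if p x then acc else acc ++ [x]) acc
      = acc ++ l.filter (fun x => !p x) := by
  induction l generalizing acc with
  | nil => simp
  | cons x l ih => by_cases h : p x <;> simp [h, ih]

-- split₀.go walks past a whitespace-free prefix, accumulating it into cur
theorem go_nospace (w : List Char) (hw : ∀ c ∈ w, PySem.Chars.isspace c = false)
    (cs cur : List Char) (acc : List (List Char)) :
    PySem.Chars.split₀.go (w ++ cs) cur acc = PySem.Chars.split₀.go cs (w.reverse ++ cur) acc := by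
  induction w generalizing cur with
  | nil => simp
  | cons c w ih =>
      simp only [List.cons_append, PySem.Chars.split₀.go, hw c (by simp), Bool.false_eq_true,
        if_false]
      rw [ih (fun d hd => hw d (by simp [hd]))]
      simp

-- every word produced by split₀.go is non-empty and whitespace-free (given the invariants)
theorem go_props (s : List Char) (cur : List Char) (acc : List (List Char))
    (hcur : ∀ c ∈ cur, PySem.Chars.isspace c = false)
    (hacc : ∀ w ∈ acc, w ≠ [] ∧ ∀ c ∈ w, PySem.Chars.isspace c = false) :
    ∀ w ∈ PySem.Chars.split₀.go s cur acc, w ≠ [] ∧ ∀ c ∈ w, PySem.Chars.isspace c = false := by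
  induction s generalizing cur acc with
  | nil =>
      intro w hw
      by_cases hc : cur = []
      · simp [PySem.Chars.split₀.go, hc] at hw
        exact hacc w (by simpa using hw)
      · simp [PySem.Chars.split₀.go, List.isEmpty_iff, hc] at hw
        rcases hw with hw | rfl
        · exact hacc w hw
        · exact ⟨by simpa [List.reverse_eq_nil_iff] using hc,
            fun d hd => hcur d (List.mem_reverse.1 hd)⟩
  | cons c s ih =>
      intro w hw
      by_cases hsp : PySem.Chars.isspace c = true
      · by_cases hc : cur = []
        · simp [PySem.Chars.split₀.go, hsp, hc] at hw
          exact ih [] acc (by simp) hacc w hw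
        · simp [PySem.Chars.split₀.go, hsp, List.isEmpty_iff, hc] at hw
          refine ih [] (cur.reverse :: acc) (by simp) ?_ w hw
          intro v hv
          rcases List.mem_cons.1 hv with rfl | hv
          · exact ⟨by simpa [List.reverse_eq_nil_iff] using hc,
              fun d hd => hcur d (List.mem_reverse.1 hd)⟩
          · exact hacc v hv
      · simp only [PySem.Chars.split₀.go, hsp, Bool.false_eq_true, if_false] at hw
        refine ih (c :: cur) acc ?_ hacc w hw
        intro d hd
        rcases List.mem_cons.1 hd with rfl | hd
        · simpa using hsp
        · exact hcur d hd

theorem split₀_props (s : List Char) :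
    ∀ w ∈ PySem.Chars.split₀ s, w ≠ [] ∧ ∀ c ∈ w, PySem.Chars.isspace c = false := by
  simpa [PySem.Chars.split₀] using go_props s [] [] (by simp) (by simp)

-- splitting a ' '-join of whitespace-free words returns the non-empty words
theorem go_join (ws : List (List Char)) (acc : List (List Char))
    (h : ∀ w ∈ ws, ∀ c ∈ w, PySem.Chars.isspace c = false) :
    PySem.Chars.split₀.go (List.intercalate [' '] ws) [] acc
      = acc.reverse ++ ws.filter (fun w => !w.isEmpty) := by
  induction ws generalizing acc with
  | nil => simp [List.intercalate, PySem.Chars.split₀.go]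
  | cons w ws ih =>
      have hint : List.intercalate [' '] (w :: ws)
          = w ++ if ws = [] then [] else ' ' :: List.intercalate [' '] ws := by
        cases ws <;> simp [List.intercalate]
      rw [hint, go_nospace w (fun c hc => h w (by simp) c hc)]
      by_cases hws : ws = []
      · subst hws
        by_cases hw : w = []
        · simp [hw, PySem.Chars.split₀.go, List.filter]
        · obtain ⟨c, w', rfl⟩ := List.exists_cons_of_ne_nil hw
          simp [PySem.Chars.split₀.go, List.isEmpty_iff, List.filter]
      · simp only [hws, if_false]
        have hsp : PySem.Chars.isspace ' ' = true := by decide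
        by_cases hw : w = []
        · simp only [hw, List.reverse_nil, List.nil_append, PySem.Chars.split₀.go, hsp, if_true,
            List.isEmpty_nil]
          rw [ih acc (fun v hv => h v (by simp [hv]) )]
          simp
        · simp only [List.append_nil, PySem.Chars.split₀.go, hsp, if_true, List.isEmpty_iff,
            List.reverse_eq_nil_iff, hw, if_false, List.reverse_reverse]
          rw [ih (w :: acc) (fun v hv => h v (by simp [hv]))]
          simp [hw]

theorem split₀_join (ws : List (List Char))
    (h : ∀ w ∈ ws, ∀ c ∈ w, PySem.Chars.isspace c = false) :
    PySem.Chars.split₀ (PySem.Chars.join [' '] ws) = ws.filter (fun w => !w.isEmpty) := by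
  simpa [PySem.Chars.split₀, PySem.Chars.join] using go_join ws [] h

theorem split₀_join_id (ws : List (List Char))
    (h : ∀ w ∈ ws, w ≠ [] ∧ ∀ c ∈ w, PySem.Chars.isspace c = false) :
    PySem.Chars.split₀ (PySem.Chars.join [' '] ws) = ws := by
  rw [split₀_join ws (fun w hw => (h w hw).2)]
  exact List.filter_eq_self.2 (fun w hw => by simpa [List.isEmpty_iff] using (h w hw).1)

-- ===== VERDICT (by name: the statement is the Claim_ definition above) =====
set_option maxHeartbeats 1000000 in
theorem clean_tweet_text_spec : Claim_equal_clean_tweet_text := by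
  intro s _
  show clean_tweet_text s = clean_tweet_text_alt s
  simp only [clean_tweet_text, clean_tweet_text_alt]
  have hprops := split₀_props s.toList
  rw [foldl_skip_if_id (fun w => PySem.Chars.startswith w "http://".toList
      || PySem.Chars.startswith w "https://".toList || PySem.Chars.startswith w "www.".toList)
      _ [], List.nil_append]
  rw [split₀_join_id _ (fun w hw => hprops w (List.mem_of_mem_filter hw))]
  rw [foldl_skip_if_id (fun w => PySem.Chars.startswith w "@".toList) _ [], List.nil_append]
  rw [split₀_join_id _ (fun w hw =>
      hprops w (List.mem_of_mem_filter (List.mem_of_mem_filter hw)))]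
  rw [foldl_skip_if_id (fun w => PySem.Chars.startswith w "#".toList) _ [], List.nil_append]
  rw [split₀_join_id _ (fun w hw =>
      hprops w (List.mem_of_mem_filter (List.mem_of_mem_filter (List.mem_of_mem_filter hw))))]
  rw [PySem.List.foldl_append_singleton_eq_map, List.nil_append]
  rw [foldl_skip_if (fun w => PySem.Chars.startswith w "http://".toList
      || PySem.Chars.startswith w "https://".toList || PySem.Chars.startswith w "www.".toList
      || PySem.Chars.startswith w "@".toList || PySem.Chars.startswith w "#".toList)
      (fun w => w.filter (fun c => PySem.Chars.isalnum c || c == ' ')) _ [], List.nil_append]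
  -- the three successive filters are the one combined filter
  congr 1
  simp [List.filter_filter, Bool.or_assoc, Bool.and_assoc, Bool.and_comm, Bool.and_left_comm]
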